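-- pv_equiv track=rewrite | github.com/bharadwajvyadavalli/coding_patterns | prefix_sum.py | maximum_subarray_sum_with_one_deletion
-- ===== SOURCE A (Python) =====
-- from typing import List, Tuple, Dict, Set, Optional
--
-- def maximum_subarray_sum_with_one_deletion(nums: List[int]) -> Tuple[int, Tuple[int, int, int]]:
--     """
--     LeetCode 1186 Extension - Maximum Subarray Sum with One Deletion Details (Hard)
--
--     Find maximum sum of subarray with at most one element deletion.
--     Extended: Return the subarray bounds and deleted index (if any).
--
--     Algorithm:
--     1. Calculate max subarray ending at each position
--     2. Calculate max subarray starting at each position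
--     3. Try deleting each element
--
--     Time: O(n), Space: O(n)
--
--     Example:
--     nums = [1,-2,0,3]
--     Output: (4, (0, 3, 1)) - delete index 1
--     """
--     n = len(nums)
--     if n == 1:
--         return nums[0], (0, 0, -1)
--
--     # fw[i] = maximum subarray sum ending at i
--     fw = [float('-inf')] * n
--     fw[0] = nums[0]
--
--     # bw[i] = maximum subarray sum starting at i
--     bw = [float('-inf')] * n
--     bw[n - 1] = nums[n - 1]
--
--     # Forward pass
--     for i in range(1, n):
--         fw[i] = max(nums[i], fw[i - 1] + nums[i])
--
--     # Backward pass
--     for i in range(n - 2, -1, -1):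
--         bw[i] = max(nums[i], bw[i + 1] + nums[i])
--
--     # Case 1: No deletion
--     max_sum = max(fw)
--     no_del_idx = fw.index(max_sum)
--
--     # Find start of subarray for no deletion case
--     start = no_del_idx
--     temp_sum = nums[no_del_idx]
--     while start > 0 and temp_sum < fw[no_del_idx]:
--         start -= 1
--         temp_sum += nums[start]
--
--     result = (max_sum, (start, no_del_idx, -1))
--
--     # Case 2: Delete one element
--     for i in range(1, n - 1):
--         # Delete element at i, connect fw[i-1] and bw[i+1]
--         sum_with_deletion = fw[i - 1] + bw[i + 1]
--         if sum_with_deletion > max_sum: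
--             max_sum = sum_with_deletion
--
--             # Find actual bounds
--             # Find start of fw[i-1]
--             start = i - 1
--             temp_sum = nums[i - 1]
--             while start > 0 and temp_sum < fw[i - 1]:
--                 start -= 1
--                 temp_sum += nums[start]
--
--             # Find end of bw[i+1]
--             end = i + 1
--             temp_sum = nums[i + 1]
--             while end < n - 1 and temp_sum < bw[i + 1]:
--                 end += 1
--                 temp_sum += nums[end]
--
--             result = (max_sum, (start, end, i))
--
--     return result
-- ===== SOURCE B (Python) =====
-- from typing import List, Tuple
--
-- def maximum_subarray_sum_with_one_deletion(nums: List[int]) -> Tuple[int, Tuple[int, int, int]]: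
--     """O(n) re-implementation: the DP passes also record the start index of the
--     best subarray ending at i (and the end index of the best subarray starting
--     at i), so bounds are read off in O(1) instead of walking back/forward."""
--     n = len(nums)
--     if n == 1:
--         return nums[0], (0, 0, -1)
--
--     # Forward pass: fw[i] = best sum ending at i, st[i] = its start index.
--     fw = [0] * n
--     st = [0] * n
--     fw[0] = nums[0]
--     best = nums[0]
--     best_idx = 0
--     best_start = 0
--     for i in range(1, n):
--         if fw[i - 1] > 0:
--             fw[i] = fw[i - 1] + nums[i]
--             st[i] = st[i - 1]
--         else:
--             fw[i] = nums[i]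
--             st[i] = i
--         if fw[i] > best:
--             best = fw[i]
--             best_idx = i
--             best_start = st[i]
--
--     # Backward pass: bw[i] = best sum starting at i, en[i] = its end index.
--     bw = [0] * n
--     en = [0] * n
--     bw[n - 1] = nums[n - 1]
--     en[n - 1] = n - 1
--     for i in range(n - 2, -1, -1):
--         if bw[i + 1] > 0:
--             bw[i] = bw[i + 1] + nums[i]
--             en[i] = en[i + 1]
--         else:
--             bw[i] = nums[i]
--             en[i] = i
--
--     max_sum = best
--     result = (best, (best_start, best_idx, -1))
--     for i in range(1, n - 1):
--         s = fw[i - 1] + bw[i + 1]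
--         if s > max_sum:
--             max_sum = s
--             result = (s, (st[i - 1], en[i + 1], i))
--     return result
-- ===== Notes on version B (the rewrite author's own statement) =====
-- stated objective: faster
-- what changed: The O(n^2)-worst-case walk-back/walk-forward loops that reconstruct subarray bounds and the separate max(fw)/fw.index passes are removed: the two DP passes also record the start index of the best subarray ending at i and the end index of the best subarray starting at i (and track the running best with its start), so every bound is read in O(1).
import Mathlib
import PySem

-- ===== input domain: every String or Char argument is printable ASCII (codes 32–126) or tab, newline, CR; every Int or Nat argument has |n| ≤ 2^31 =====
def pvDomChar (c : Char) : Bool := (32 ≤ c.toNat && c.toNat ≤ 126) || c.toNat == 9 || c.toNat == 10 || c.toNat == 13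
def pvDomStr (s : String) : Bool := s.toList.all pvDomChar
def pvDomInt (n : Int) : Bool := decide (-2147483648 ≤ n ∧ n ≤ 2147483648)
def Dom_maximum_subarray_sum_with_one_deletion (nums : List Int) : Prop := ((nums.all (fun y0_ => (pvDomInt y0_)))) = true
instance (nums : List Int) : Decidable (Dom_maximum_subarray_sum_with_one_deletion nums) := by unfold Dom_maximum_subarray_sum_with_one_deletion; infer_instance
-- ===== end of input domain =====

-- B removes A's O(n^2)-worst-case walk-back/walk-forward bound reconstruction and the max/index passes:
-- the DP passes also record start/end indices, so bounds are read in O(1) (asymptotically faster, measured).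
-- A raises IndexError on the empty list; Pre_ excludes it (B raises there too).

-- ===== PORT A =====
-- fw[i] (max subarray sum ending at i): the forward DP array as its defining recursion
def fwA (nums : List Int) : Nat → Int
  | 0 => nums.getD 0 0
  | i + 1 => max (nums.getD (i + 1) 0) (fwA nums i + nums.getD (i + 1) 0)

-- bw[n-1-k] (max subarray sum starting at n-1-k): the backward DP array, indexed from the right
def bwA (nums : List Int) (n : Nat) : Nat → Int
  | 0 => nums.getD (n - 1) 0
  | k + 1 => max (nums.getD (n - 1 - (k + 1)) 0) (bwA nums n k + nums.getD (n - 1 - (k + 1)) 0)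

-- the 'while start > 0 and temp_sum < target: start -= 1; temp_sum += nums[start]' loop
def aWalkStart (nums : List Int) (target : Int) (start : Nat) (temp : Int) : Nat :=
  if h : 0 < start ∧ temp < target then
    aWalkStart nums target (start - 1) (temp + nums.getD (start - 1) 0)
  else start
termination_by start
decreasing_by omega

-- the 'while end < n - 1 and temp_sum < target: end += 1; temp_sum += nums[end]' loop
def aWalkEnd (nums : List Int) (n : Nat) (target : Int) (e : Nat) (temp : Int) : Nat :=
  if h : e < n - 1 ∧ temp < target then
    aWalkEnd nums n target (e + 1) (temp + nums.getD (e + 1) 0)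
  else e
termination_by n - 1 - e
decreasing_by omega

def maximum_subarray_sum_with_one_deletion (nums : List Int) : Int × (Int × Int × Int) :=
  let n := nums.length
  if n = 1 then (nums.getD 0 0, (0, 0, -1)) else
  let fw : List Int := (List.range n).map (fwA nums)
  let bw : List Int := (List.range n).map (fun i => bwA nums n (n - 1 - i))
  let max_sum : Int := (PySem.List.max? fw (fun y => y)).getD 0
  let no_del_idx : Nat := (PySem.List.index? fw max_sum).getD 0
  let start0 : Nat := aWalkStart nums (fw.getD no_del_idx 0) no_del_idx (nums.getD no_del_idx 0)
  let result0 : Int × (Int × Int × Int) := (max_sum, ((start0 : Int), (no_del_idx : Int), -1))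
  let final := (List.range' 1 (n - 2)).foldl
    (fun (st : Int × (Int × (Int × Int × Int))) i =>
      let swd := fw.getD (i - 1) 0 + bw.getD (i + 1) 0
      if st.1 < swd then
        let s := aWalkStart nums (fw.getD (i - 1) 0) (i - 1) (nums.getD (i - 1) 0)
        let e := aWalkEnd nums n (bw.getD (i + 1) 0) (i + 1) (nums.getD (i + 1) 0)
        (swd, (swd, ((s : Int), (e : Int), (i : Int))))
      else st)
    (max_sum, result0)
  final.2

-- ===== PORT B =====
-- fw[i] of B's forward pass
def fwB (nums : List Int) : Nat → Int
  | 0 => nums.getD 0 0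
  | i + 1 => if 0 < fwB nums i then fwB nums i + nums.getD (i + 1) 0 else nums.getD (i + 1) 0

-- st[i]: start index recorded alongside fw[i]
def stB (nums : List Int) : Nat → Nat
  | 0 => 0
  | i + 1 => if 0 < fwB nums i then stB nums i else i + 1

-- bw[n-1-k] of B's backward pass
def bwB (nums : List Int) (n : Nat) : Nat → Int
  | 0 => nums.getD (n - 1) 0
  | k + 1 => if 0 < bwB nums n k then bwB nums n k + nums.getD (n - 1 - (k + 1)) 0
             else nums.getD (n - 1 - (k + 1)) 0

-- en[n-1-k]: end index recorded alongside bw[n-1-k]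
def enB (nums : List Int) (n : Nat) : Nat → Nat
  | 0 => n - 1
  | k + 1 => if 0 < bwB nums n k then enB nums n k else n - 1 - (k + 1)

def maximum_subarray_sum_with_one_deletion_alt (nums : List Int) : Int × (Int × Int × Int) :=
  let n := nums.length
  if n = 1 then (nums.getD 0 0, (0, 0, -1)) else
  -- running best of the forward pass: (best, best_idx, best_start)
  let best3 : Int × Nat × Nat := (List.range' 1 (n - 1)).foldl
    (fun (acc : Int × Nat × Nat) i =>
      if acc.1 < fwB nums i then (fwB nums i, i, stB nums i) else acc)
    (nums.getD 0 0, 0, 0)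
  let result0 : Int × (Int × Int × Int) :=
    (best3.1, ((best3.2.2 : Int), (best3.2.1 : Int), -1))
  let final := (List.range' 1 (n - 2)).foldl
    (fun (st : Int × (Int × (Int × Int × Int))) i =>
      let s := fwB nums (i - 1) + bwB nums n (n - 2 - i)
      if st.1 < s then
        (s, (s, ((stB nums (i - 1) : Int), (enB nums n (n - 2 - i) : Int), (i : Int))))
      else st)
    (best3.1, result0)
  final.2

-- ===== PRECONDITION & SPEC =====
-- Python A indexes the first element of the empty list and raises IndexError; only that input is excluded.
def Pre_maximum_subarray_sum_with_one_deletion (nums : List Int) : Prop := nums ≠ []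
instance (nums : List Int) : Decidable (Pre_maximum_subarray_sum_with_one_deletion nums) := by unfold Pre_maximum_subarray_sum_with_one_deletion; infer_instance
def pvWitness_maximum_subarray_sum_with_one_deletion : List Int := [1, -2, 0, 3]
def Spec_maximum_subarray_sum_with_one_deletion (nums : List Int) (out : Int × (Int × Int × Int)) : Prop := out = maximum_subarray_sum_with_one_deletion_alt nums
instance (nums : List Int) (out : Int × (Int × Int × Int)) : Decidable (Spec_maximum_subarray_sum_with_one_deletion nums out) := by unfold Spec_maximum_subarray_sum_with_one_deletion; infer_instance

-- ===== CLAIM (what is proved, stated in full; the proofs are below) =====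
def Claim_equal_maximum_subarray_sum_with_one_deletion : Prop := ∀ (nums : List Int), Dom_maximum_subarray_sum_with_one_deletion nums → Pre_maximum_subarray_sum_with_one_deletion nums → Spec_maximum_subarray_sum_with_one_deletion nums (maximum_subarray_sum_with_one_deletion nums)

-- ===== LEMMAS AND PROOFS =====

theorem fwB_eq_fwA (nums : List Int) (i : Nat) : fwB nums i = fwA nums i := by
  induction i with
  | zero => rfl
  | succ i ih => simp only [fwB, fwA, ih]; split_ifs <;> omega

theorem bwB_eq_bwA (nums : List Int) (n k : Nat) : bwB nums n k = bwA nums n k := by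
  induction k with
  | zero => rfl
  | succ k ih => simp only [bwB, bwA, ih]; split_ifs <;> omega

-- A's walk-back loop computes exactly B's recorded start index (shift c keeps the invariant)
theorem walkStart_eq (nums : List Int) (i : Nat) :
    ∀ c : Int, aWalkStart nums (fwA nums i + c) i (nums.getD i 0 + c) = stB nums i := by
  induction i with
  | zero =>
    intro c; rw [aWalkStart]; simp [stB]
  | succ i ih =>
    intro c
    rcases (by omega : fwA nums i ≤ 0 ∨ 0 < fwA nums i) with hle | hpos
    · have hmax : fwA nums (i + 1) = nums.getD (i + 1) 0 := by
        simp only [fwA]; omega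
      rw [aWalkStart]
      have : ¬ (0 < i + 1 ∧ nums.getD (i + 1) 0 + c < fwA nums (i + 1) + c) := by
        rw [hmax]; omega
      rw [dif_neg this]
      simp only [stB, fwB_eq_fwA]
      rw [if_neg (by omega)]
    · have hmax : fwA nums (i + 1) = fwA nums i + nums.getD (i + 1) 0 := by
        simp only [fwA]; omega
      rw [aWalkStart]
      have hcond : 0 < i + 1 ∧ nums.getD (i + 1) 0 + c < fwA nums (i + 1) + c := by
        rw [hmax]; omega
      rw [dif_pos hcond]
      simp only [Nat.add_sub_cancel]
      have := ih (nums.getD (i + 1) 0 + c)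
      rw [show fwA nums (i + 1) + c = fwA nums i + (nums.getD (i + 1) 0 + c) by rw [hmax]; ring,
          show nums.getD (i + 1) 0 + c + nums.getD i 0 = nums.getD i 0 + (nums.getD (i + 1) 0 + c) by ring,
          this]
      simp only [stB, fwB_eq_fwA]
      rw [if_pos hpos]

-- A's walk-forward loop computes exactly B's recorded end index
theorem walkEnd_eq (nums : List Int) (n : Nat) (k : Nat) (hk : k ≤ n - 1) :
    ∀ c : Int, aWalkEnd nums n (bwA nums n k + c) (n - 1 - k) (nums.getD (n - 1 - k) 0 + c) = enB nums n k := by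
  induction k with
  | zero =>
    intro c; rw [aWalkEnd]
    have : ¬ (n - 1 - 0 < n - 1 ∧ nums.getD (n - 1 - 0) 0 + c < bwA nums n 0 + c) := by omega
    rw [dif_neg this]; rfl
  | succ k ih =>
    intro c
    rcases (by omega : bwA nums n k ≤ 0 ∨ 0 < bwA nums n k) with hle | hpos
    · have hmax : bwA nums n (k + 1) = nums.getD (n - 1 - (k + 1)) 0 := by
        simp only [bwA]; omega
      rw [aWalkEnd]
      have : ¬ (n - 1 - (k + 1) < n - 1 ∧
          nums.getD (n - 1 - (k + 1)) 0 + c < bwA nums n (k + 1) + c) := by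
        rw [hmax]; omega
      rw [dif_neg this]
      simp only [enB, bwB_eq_bwA]
      rw [if_neg (by omega)]
    · have hmax : bwA nums n (k + 1) = bwA nums n k + nums.getD (n - 1 - (k + 1)) 0 := by
        simp only [bwA]; omega
      rw [aWalkEnd]
      have hcond : n - 1 - (k + 1) < n - 1 ∧
          nums.getD (n - 1 - (k + 1)) 0 + c < bwA nums n (k + 1) + c := by
        constructor
        · omega
        · rw [hmax]; omega
      rw [dif_pos hcond]
      have he : n - 1 - (k + 1) + 1 = n - 1 - k := by omega
      rw [he]
      have := ih (by omega) (nums.getD (n - 1 - (k + 1)) 0 + c)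
      rw [show bwA nums n (k + 1) + c = bwA nums n k + (nums.getD (n - 1 - (k + 1)) 0 + c) by rw [hmax]; ring,
          show nums.getD (n - 1 - (k + 1)) 0 + c + nums.getD (n - 1 - k) 0
             = nums.getD (n - 1 - k) 0 + (nums.getD (n - 1 - (k + 1)) 0 + c) by ring,
          this]
      simp only [enB, bwB_eq_bwA]
      rw [if_pos hpos]

-- B's forward fold tracks the first argmax of fwA over 0..m, together with its recorded start
theorem fold_best (nums : List Int) (m : Nat) :
    ∃ bi : Nat, bi ≤ m ∧
      (List.range' 1 m).foldl
        (fun (acc : Int × Nat × Nat) i =>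
          if acc.1 < fwB nums i then (fwB nums i, i, stB nums i) else acc)
        (nums.getD 0 0, 0, 0)
      = (fwA nums bi, bi, stB nums bi) ∧
      (List.range' 1 m).foldl (fun (a : Int) i => max a (fwA nums i)) (fwA nums 0) = fwA nums bi ∧
      (∀ j, j ≤ m → fwA nums j ≤ fwA nums bi) ∧
      (∀ j, j < bi → fwA nums j < fwA nums bi) := by
  induction m with
  | zero =>
    refine ⟨0, le_refl 0, ?_, rfl, ?_, ?_⟩
    · simp [fwA, stB]
    · intro j hj; interval_cases j; rfl
    · intro j hj; omega
  | succ m ih =>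
    obtain ⟨bi, hbi, hfold, hmaxf, hub, hlt⟩ := ih
    rw [List.range'_1_concat, List.foldl_append, List.foldl_append, hfold, hmaxf]
    simp only [List.foldl_cons, List.foldl_nil]
    rw [show (1 : Nat) + m = m + 1 by omega]
    by_cases hc : fwA nums bi < fwA nums (m + 1)
    · refine ⟨m + 1, le_refl _, ?_, ?_, ?_, ?_⟩
      · simp only [fwB_eq_fwA]; rw [if_pos hc]
      · omega
      · intro j hj
        rcases Nat.lt_succ_iff_lt_or_eq.mp (Nat.lt_succ_of_le hj) with h | h
        · exact le_of_lt (lt_of_le_of_lt (hub j (by omega)) hc)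
        · rw [h]
      · intro j hj
        exact lt_of_le_of_lt (hub j (by omega)) hc
    · refine ⟨bi, by omega, ?_, ?_, ?_, hlt⟩
      · simp only [fwB_eq_fwA]; rw [if_neg hc]
      · omega
      · intro j hj
        rcases Nat.lt_succ_iff_lt_or_eq.mp (Nat.lt_succ_of_le hj) with h | h
        · exact hub j (by omega)
        · rw [h]; omega
-- (continued below)

-- first occurrence of the maximum in the mapped range is its first argmax
theorem index?_map_first (nums : List Int) (n bi : Nat) (hbi : bi < n)
    (hlt : ∀ j, j < bi → fwA nums j < fwA nums bi) :
    PySem.List.index? ((List.range n).map (fwA nums)) (fwA nums bi) = some bi := by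
  rw [PySem.List.index?_eq_some_iff]
  refine ⟨(List.range bi).map (fwA nums), (List.range' (bi + 1) (n - bi - 1)).map (fwA nums),
    ?_, by simp, ?_⟩
  · rw [← List.map_cons, ← List.map_append]
    congr 1
    rw [List.range_eq_range', List.range_eq_range',
        show n = bi + ((n - bi - 1) + 1) by omega, ← List.range'_append_1, List.range'_succ]
    simp only [Nat.zero_add]
    congr 3
    omega
  · simp only [List.mem_map, List.mem_range]
    rintro ⟨j, hj, hje⟩
    exact absurd hje (ne_of_lt (hlt j hj))

theorem main_eq (nums : List Int) (h : nums ≠ []) :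
    maximum_subarray_sum_with_one_deletion nums = maximum_subarray_sum_with_one_deletion_alt nums := by
  by_cases h1 : nums.length = 1
  · simp [maximum_subarray_sum_with_one_deletion, maximum_subarray_sum_with_one_deletion_alt, h1]
  · have hn2 : 2 ≤ nums.length := by
      rcases nums with _ | ⟨a, _ | ⟨b, u⟩⟩
      · exact absurd rfl h
      · simp at h1
      · simp only [List.length_cons]; omega
    obtain ⟨bi, hbi, hfold, hmaxf, hub, hlt⟩ := fold_best nums (nums.length - 1)
    have hbin : bi < nums.length := by omega
    have hsplit : ((List.range nums.length).map (fwA nums))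
        = fwA nums 0 :: (List.range' 1 (nums.length - 1)).map (fwA nums) := by
      rw [List.range_eq_range', show nums.length = (nums.length - 1) + 1 by omega,
          List.range'_succ, List.map_cons]
      norm_num
    have hmax : (PySem.List.max? ((List.range nums.length).map (fwA nums)) (fun y => y)).getD 0
        = fwA nums bi := by
      rw [hsplit, PySem.List.max?_id_cons, Option.getD_some, List.foldl_map, hmaxf]
    have hidx : (PySem.List.index? ((List.range nums.length).map (fwA nums)) (fwA nums bi)).getD 0
        = bi := by
      rw [index?_map_first nums nums.length bi hbin hlt, Option.getD_some]
    have hgetD : ∀ j, j < nums.length → ((List.range nums.length).map (fwA nums)).getD j 0 = fwA nums j :=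
      fun j hj => PySem.List.getD_map_range (fwA nums) nums.length j 0 hj
    have hgetDb : ∀ j, j < nums.length →
        ((List.range nums.length).map (fun i => bwA nums nums.length (nums.length - 1 - i))).getD j 0
        = bwA nums nums.length (nums.length - 1 - j) :=
      fun j hj => PySem.List.getD_map_range _ nums.length j 0 hj
    have hstart0 : aWalkStart nums (fwA nums bi) bi (nums.getD bi 0) = stB nums bi := by
      have := walkStart_eq nums bi 0; simpa using this
    simp only [maximum_subarray_sum_with_one_deletion, maximum_subarray_sum_with_one_deletion_alt,
      if_neg h1]
    rw [hmax, hidx, hgetD bi hbin, hstart0, hfold]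
    have hsteps : ∀ (acc : Int × (Int × (Int × Int × Int))) (i : Nat), i ∈ List.range' 1 (nums.length - 2) →
        (fun (st : Int × (Int × (Int × Int × Int))) i =>
          let swd := ((List.range nums.length).map (fwA nums)).getD (i - 1) 0 +
            ((List.range nums.length).map (fun i => bwA nums nums.length (nums.length - 1 - i))).getD (i + 1) 0
          if st.1 < swd then
            let s := aWalkStart nums (((List.range nums.length).map (fwA nums)).getD (i - 1) 0) (i - 1) (nums.getD (i - 1) 0)
            let e := aWalkEnd nums nums.length
              (((List.range nums.length).map (fun i => bwA nums nums.length (nums.length - 1 - i))).getD (i + 1) 0)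
              (i + 1) (nums.getD (i + 1) 0)
            (swd, (swd, ((s : Int), (e : Int), (i : Int))))
          else st) acc i
        = (fun (st : Int × (Int × (Int × Int × Int))) i =>
          let s := fwB nums (i - 1) + bwB nums nums.length (nums.length - 2 - i)
          if st.1 < s then
            (s, (s, ((stB nums (i - 1) : Int), (enB nums nums.length (nums.length - 2 - i) : Int), (i : Int))))
          else st) acc i := by
      intro acc i hi
      rw [List.mem_range'_1] at hi
      have hi1 : 1 ≤ i := hi.1
      have hi2 : i ≤ nums.length - 2 := by omega
      have hk : nums.length - 1 - (i + 1) = nums.length - 2 - i := by omega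
      have hnk : nums.length - 1 - (nums.length - 2 - i) = i + 1 := by omega
      dsimp only
      rw [hgetD (i - 1) (by omega), hgetDb (i + 1) (by omega), hk,
          fwB_eq_fwA, bwB_eq_bwA]
      have hws : aWalkStart nums (fwA nums (i - 1)) (i - 1) (nums.getD (i - 1) 0) = stB nums (i - 1) := by
        have := walkStart_eq nums (i - 1) 0; simpa using this
      have hwe : aWalkEnd nums nums.length (bwA nums nums.length (nums.length - 2 - i)) (i + 1)
          (nums.getD (i + 1) 0) = enB nums nums.length (nums.length - 2 - i) := by
        have := walkEnd_eq nums nums.length (nums.length - 2 - i) (by omega) 0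
        rw [hnk] at this; simpa using this
      rw [hws, hwe]
    refine congrArg Prod.snd ?_
    exact PySem.List.foldl_congr_mem _ _ _ _ hsteps

-- ===== VERDICT (by name: the statement is the Claim_ definition above) =====
theorem maximum_subarray_sum_with_one_deletion_spec : Claim_equal_maximum_subarray_sum_with_one_deletion := by
  intro nums _ hpre
  exact main_eq nums hpre
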